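-- pv_equiv track=rewrite | github.com/SeyoungKimLab/Ornaments | create_personalized_transcriptome.py | snps_inds_are_in_range
-- ===== SOURCE A (Python) =====
-- def snps_inds_are_in_range(snps, indels, range_):
--   to_ret = True
--   for s in snps:
--     if s < range_[0] or s > range_[1]:
--       to_ret = False
--   for i in indels:
--     if i < range_[0] or i >= range_[1]:
--       to_ret = False
--   return to_ret
-- ===== SOURCE B (Python) =====
-- def snps_inds_are_in_range(snps, indels, range_):
--     if snps and (min(snps) < range_[0] or max(snps) > range_[1]):
--         return False
--     if indels and (min(indels) < range_[0] or max(indels) >= range_[1]):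
--         return False
--     return True
-- ===== Notes on version B (the rewrite author's own statement) =====
-- stated objective: alternative
-- what changed: Replaces the element-by-element boolean-accumulator scans with an extremes-based check: compute min/max of each non-empty list once and compare only those against the bounds (inclusive upper bound for snps, strict for indels).
import Mathlib
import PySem

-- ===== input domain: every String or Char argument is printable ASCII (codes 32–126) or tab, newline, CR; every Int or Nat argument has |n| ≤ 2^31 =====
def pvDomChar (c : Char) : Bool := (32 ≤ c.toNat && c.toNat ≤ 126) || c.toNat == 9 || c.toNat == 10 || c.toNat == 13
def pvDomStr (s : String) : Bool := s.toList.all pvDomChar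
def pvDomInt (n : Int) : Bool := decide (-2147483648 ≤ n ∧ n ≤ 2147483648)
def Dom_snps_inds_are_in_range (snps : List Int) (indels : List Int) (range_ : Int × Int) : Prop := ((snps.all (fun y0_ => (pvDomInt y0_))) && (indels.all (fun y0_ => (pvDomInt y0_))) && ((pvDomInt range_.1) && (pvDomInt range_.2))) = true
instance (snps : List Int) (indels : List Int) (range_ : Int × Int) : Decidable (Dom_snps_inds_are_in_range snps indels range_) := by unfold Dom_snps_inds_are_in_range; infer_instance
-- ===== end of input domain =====

-- ===== PORT A =====
-- Header: B replaces the two boolean-accumulator scans with one min/max check per non-empty list (same bounds, same asymmetry); alternative decomposition, not claimed faster.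
def snps_inds_are_in_range (snps : List Int) (indels : List Int) (range_ : Int × Int) : Bool :=
  let to_ret := true
  let to_ret := snps.foldl (fun acc s => if s < range_.1 || s > range_.2 then false else acc) to_ret
  let to_ret := indels.foldl (fun acc i => if i < range_.1 || i ≥ range_.2 then false else acc) to_ret
  to_ret

-- ===== PORT B =====
def snps_inds_are_in_range_alt (snps : List Int) (indels : List Int) (range_ : Int × Int) : Bool :=
  if snps ≠ [] &&
      ((PySem.List.min? snps (fun x => x)).getD 0 < range_.1 ||
       (PySem.List.max? snps (fun x => x)).getD 0 > range_.2) then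
    false
  else if indels ≠ [] &&
      ((PySem.List.min? indels (fun x => x)).getD 0 < range_.1 ||
       (PySem.List.max? indels (fun x => x)).getD 0 ≥ range_.2) then
    false
  else
    true

-- ===== PRECONDITION & SPEC =====
def Spec_snps_inds_are_in_range (snps : List Int) (indels : List Int) (range_ : Int × Int) (out : Bool) : Prop := out = snps_inds_are_in_range_alt snps indels range_
instance (snps : List Int) (indels : List Int) (range_ : Int × Int) (out : Bool) : Decidable (Spec_snps_inds_are_in_range snps indels range_ out) := by unfold Spec_snps_inds_are_in_range; infer_instance

-- ===== CLAIM (what is proved, stated in full; the proofs are below) =====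
def Claim_equal_snps_inds_are_in_range : Prop := ∀ (snps : List Int) (indels : List Int) (range_ : Int × Int), Dom_snps_inds_are_in_range snps indels range_ → Spec_snps_inds_are_in_range snps indels range_ (snps_inds_are_in_range snps indels range_)

-- ===== LEMMAS AND PROOFS =====

-- ===== VERDICT (by name: the statement is the Claim_ definition above) =====
-- A's accumulator loop computes: all elements satisfy the bound.
theorem foldl_flag (P : Int → Bool) (xs : List Int) (b : Bool) :
    xs.foldl (fun acc x => if P x then false else acc) b = (b && xs.all (fun x => !P x)) := by
  induction xs generalizing b with
  | nil => simp
  | cons x t ih =>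
    simp only [List.foldl_cons, List.all_cons]
    rw [ih]
    cases P x
    · simp
    · simp

-- B's extremes-based test equals the all-elements test.
theorem minmax_flag (lo hi : Int) (str : Bool) (xs : List Int) :
    (xs ≠ [] &&
      ((PySem.List.min? xs (fun x => x)).getD 0 < lo ||
       (if str then (PySem.List.max? xs (fun x => x)).getD 0 ≥ hi
        else (PySem.List.max? xs (fun x => x)).getD 0 > hi)))
    = !(xs.all (fun x => !(x < lo || (if str then x ≥ hi else x > hi)))) := by
  cases xs with
  | nil => simp
  | cons x t =>
    have hmin := PySem.List.min?_id_cons (x := x) (t := t)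
    have hmax := PySem.List.max?_id_cons (x := x) (t := t)
    have hminmem : t.foldl min x ∈ x :: t := by
      have := PySem.List.min?_mem (key := fun y => y) hmin; simpa using this
    have hmaxmem : t.foldl max x ∈ x :: t := by
      have := PySem.List.max?_mem (key := fun y => y) hmax; simpa using this
    have hminle : ∀ y ∈ x :: t, t.foldl min x ≤ y := by
      intro y hy; simpa using PySem.List.min?_isMin (key := fun z => z) hmin y hy
    have hmaxge : ∀ y ∈ x :: t, y ≤ t.foldl max x := by
      intro y hy; simpa using PySem.List.max?_isMax (key := fun z => z) hmax y hy
    rw [hmin, hmax, Bool.eq_iff_iff]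
    cases str <;>
      · simp only [Option.getD_some, if_true, if_false, Bool.and_eq_true, Bool.or_eq_true,
          decide_eq_true_eq, Bool.not_eq_true', List.all_eq_false, Bool.not_eq_false,
          ne_eq, reduceCtorEq, not_false_eq_true, true_and]
        constructor
        · rintro (h | h)
          · exact ⟨_, hminmem, by simp; omega⟩
          · exact ⟨_, hmaxmem, by simp; omega⟩
        · rintro ⟨y, hy, hcond⟩
          have h1 := hminle y hy
          have h2 := hmaxge y hy
          simp at hcond
          omega

theorem snps_inds_are_in_range_spec : Claim_equal_snps_inds_are_in_range := by
  intro snps indels range_ _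
  unfold Spec_snps_inds_are_in_range snps_inds_are_in_range snps_inds_are_in_range_alt
  simp only [foldl_flag]
  have h1 := minmax_flag range_.1 range_.2 false snps
  have h2 := minmax_flag range_.1 range_.2 true indels
  simp only [Bool.false_eq_true, if_false, if_true] at h1 h2
  rw [h1, h2]
  cases snps.all (fun x => !(decide (x < range_.1) || decide (x > range_.2))) <;>
    cases indels.all (fun x => !(decide (x < range_.1) || decide (x ≥ range_.2))) <;> simp
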